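-- pv_equiv track=rewrite | github.com/pc5401/my_BOJ | 백준/Gold/1034. 램프/램프.py | solve
-- ===== SOURCE A (Python) =====
-- import collections
--
-- def solve(N: int, M: int, K: int, lamp_map: list[list[int]]) -> int:
--     """
--     동일 패턴 그룹화 & 패턴 기반 최적화
--     """
--     patterns = collections.defaultdict(int)
--
--     for lamps in lamp_map:
--         patterns[tuple(lamps)] += 1
--
--     rtn = 0
--
--     for pattern, cnt in patterns.items():
--         zero_cnt = pattern.count(0)
--
--         # 0의 개수가 K번 이하이고 K와 0의 개수가 모두 홀수이거나 모두 짝수일 경우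
--         if zero_cnt <= K and (K - zero_cnt) % 2 == 0:
--             rtn = max(rtn, cnt) # 해당 패턴과 같은 행의 수를 최대 켜진 행의 수와 비교
--
--     return rtn
-- ===== SOURCE B (Python) =====
-- def solve(N: int, M: int, K: int, lamp_map: list[list[int]]) -> int:
--     # Iterative partition ("quick-group"): repeatedly take the first remaining
--     # row, strip ALL rows equal to it from the worklist, and judge that whole
--     # group at once; group size = how much the worklist shrank. No dict/counter.
--     best = 0
--     rows = lamp_map
--     while rows:
--         head = rows[0]
--         rest = [row for row in rows[1:] if row != head]
--         z = head.count(0)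
--         if z <= K and (K - z) % 2 == 0:
--             best = max(best, len(rows) - len(rest))
--         rows = rest
--     return best
-- ===== Notes on version B (the rewrite author's own statement) =====
-- stated objective: alternative
-- what changed: B builds no frequency dictionary at all: it repeatedly partitions the remaining worklist on its first row, judging each group's eligibility and measuring its size by how much the worklist shrinks, until the worklist is empty.
import Mathlib
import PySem

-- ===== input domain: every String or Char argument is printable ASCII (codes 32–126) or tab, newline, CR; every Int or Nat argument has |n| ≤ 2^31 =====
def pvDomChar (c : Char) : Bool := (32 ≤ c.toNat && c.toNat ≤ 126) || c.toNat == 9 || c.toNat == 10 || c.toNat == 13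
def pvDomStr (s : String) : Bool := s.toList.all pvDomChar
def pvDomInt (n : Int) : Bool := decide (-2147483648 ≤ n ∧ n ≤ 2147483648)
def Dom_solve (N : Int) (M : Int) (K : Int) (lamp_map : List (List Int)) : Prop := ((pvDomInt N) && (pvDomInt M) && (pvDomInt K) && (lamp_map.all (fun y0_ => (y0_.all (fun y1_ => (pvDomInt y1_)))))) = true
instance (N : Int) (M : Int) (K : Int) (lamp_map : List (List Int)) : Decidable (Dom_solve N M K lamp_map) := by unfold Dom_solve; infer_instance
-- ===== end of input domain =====

-- B replaces A's defaultdict grouping with an iterative partition: repeatedly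
-- strip the first remaining row's whole group from a worklist, judging each
-- group by how much the worklist shrinks (alternative organisation, no dict).

-- ===== PORT A =====
def solve (N : Int) (M : Int) (K : Int) (lamp_map : List (List Int)) : Int :=
  -- patterns = defaultdict(int); for lamps in lamp_map: patterns[tuple(lamps)] += 1
  let patterns : PySem.Dict (List Int) Int :=
    lamp_map.foldl (fun d lamps => d.modify lamps 0 (· + 1)) PySem.Dict.empty
  -- for pattern, cnt in patterns.items(): …
  patterns.items.foldl (fun rtn pc =>
    let zero_cnt : Int := (PySem.List.count pc.1 0 : Int)
    if zero_cnt ≤ K ∧ PySem.Int.mod (K - zero_cnt) 2 = 0 then max rtn pc.2 else rtn) 0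

-- ===== PORT B =====
-- the while-loop of Source B: state (rows, best); rows := rows[1:] minus the head's group
def altRec (K : Int) : List (List Int) → Int → Int
  | [], best => best
  | h :: t, best =>
    let rest := t.filter (fun r => r ≠ h)
    let z : Int := (PySem.List.count h 0 : Int)
    let best' := if z ≤ K ∧ PySem.Int.mod (K - z) 2 = 0
      then max best (((t.length : Int) + 1) - (rest.length : Int)) else best
    altRec K rest best'
termination_by xs _ => xs.length
decreasing_by
  simp only [List.length_cons, Nat.lt_succ_iff, List.length_unattach]
  exact le_trans (List.length_filter_le _ _) (by simp)

def solve_alt (N : Int) (M : Int) (K : Int) (lamp_map : List (List Int)) : Int :=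
  altRec K lamp_map 0

-- ===== PRECONDITION & SPEC =====
def Spec_solve (N : Int) (M : Int) (K : Int) (lamp_map : List (List Int)) (out : Int) : Prop := out = solve_alt N M K lamp_map
instance (N : Int) (M : Int) (K : Int) (lamp_map : List (List Int)) (out : Int) : Decidable (Spec_solve N M K lamp_map out) := by unfold Spec_solve; infer_instance

-- ===== CLAIM (what is proved, stated in full; the proofs are below) =====
def Claim_equal_solve : Prop := ∀ (N : Int) (M : Int) (K : Int) (lamp_map : List (List Int)), Dom_solve N M K lamp_map → Spec_solve N M K lamp_map (solve N M K lamp_map)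

-- ===== LEMMAS AND PROOFS =====

/-- Eligibility test shared by both programs. -/
def pvElig (K : Int) (r : List Int) : Bool :=
  decide ((PySem.List.count r 0 : Int) ≤ K ∧
    PySem.Int.mod (K - (PySem.List.count r 0 : Int)) 2 = 0)

/-- "Max over eligible rows of their multiplicity in xs" reference value. -/
def pvM (K : Int) (xs : List (List Int)) : Int :=
  (xs.filter (pvElig K)).foldl (fun b r => max b (List.count r xs : Int)) 0

/-- Upper bound for a running max of a projection. -/
theorem pv_foldl_max_le {α : Type} (xs : List α) (f : α → Int) (init B : Int)
    (h0 : init ≤ B) (h : ∀ x ∈ xs, f x ≤ B) :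
    xs.foldl (fun a x => max a (f x)) init ≤ B := by
  induction xs generalizing init with
  | nil => exact h0
  | cons y t ih =>
      exact ih (max init (f y)) (max_le h0 (h y (List.mem_cons_self)))
        (fun x hx => h x (List.mem_cons_of_mem _ hx))

theorem pv_M_nonneg (K : Int) (xs : List (List Int)) : 0 ≤ pvM K xs :=
  (PySem.List.le_foldl_max_int _ _ 0).1

/-- Removing all copies of h from t removes exactly (count h t) elements. -/
theorem pv_len_filter_ne (h : List Int) (t : List (List Int)) :
    ((t.filter (fun r => r ≠ h)).length : Int) + (t.count h : Int) = (t.length : Int) := by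
  induction t with
  | nil => simp
  | cons a s ih =>
      simp only [ne_eq] at ih
      by_cases hah : a = h
      · subst hah
        simp only [List.filter_cons, List.count_cons, ne_eq, not_true_eq_false,
          decide_false, Bool.false_eq_true, if_false, beq_self_eq_true, if_true,
          List.length_cons]
        push_cast at ih ⊢
        omega
      · simp only [List.filter_cons, List.count_cons, ne_eq, hah, not_false_eq_true,
          decide_true, if_true, List.length_cons]
        have hb : (a == h) = false := by simp [hah]
        rw [hb]
        push_cast at ih ⊢
        omega

theorem pv_count_filter_ne {r h : List Int} (t : List (List Int)) (hrh : r ≠ h) :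
    List.count r (t.filter (fun x => x ≠ h)) = List.count r t := by
  induction t with
  | nil => simp
  | cons a s ih =>
      simp only [ne_eq] at ih
      by_cases hah : a = h
      · subst hah
        simp only [List.filter_cons, ne_eq, not_true_eq_false, decide_false,
          Bool.false_eq_true, if_false, ih, List.count_cons]
        have hb : (a == r) = false := by simp; exact fun e => hrh e.symm
        rw [hb]
        simp
      · simp only [List.filter_cons, ne_eq, hah, not_false_eq_true, decide_true, if_true,
          List.count_cons, ih]

theorem pv_M_cons_true {K : Int} {h : List Int} (t : List (List Int))
    (hP : pvElig K h = true) :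
    pvM K (h :: t) = max ((List.count h (h :: t) : Int)) (pvM K (t.filter (fun r => r ≠ h))) := by
  apply le_antisymm
  · apply pv_foldl_max_le
    · exact le_max_of_le_right (pv_M_nonneg _ _)
    · intro x hx
      rcases List.mem_filter.mp hx with ⟨hmem, helig⟩
      by_cases hxh : x = h
      · subst hxh; exact le_max_left _ _
      · refine le_max_of_le_right ?_
        have hxt : x ∈ t := by
          rcases List.mem_cons.mp hmem with h1 | h1
          · exact absurd h1 hxh
          · exact h1
        have hcnt : (List.count x (h :: t) : Int)
            = (List.count x (t.filter (fun r => r ≠ h)) : Int) := by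
          rw [pv_count_filter_ne t hxh]; simp [List.count_cons]; exact fun e => hxh e.symm
        rw [hcnt]
        exact (PySem.List.le_foldl_max_int _ _ 0).2 x
          (List.mem_filter.mpr ⟨List.mem_filter.mpr ⟨hxt, by simpa using hxh⟩, helig⟩)
  · apply max_le
    · exact (PySem.List.le_foldl_max_int _ _ 0).2 h
        (List.mem_filter.mpr ⟨List.mem_cons_self, hP⟩)
    · apply pv_foldl_max_le
      · exact pv_M_nonneg _ _
      · intro x hx
        rcases List.mem_filter.mp hx with ⟨hmem, helig⟩
        rcases List.mem_filter.mp hmem with ⟨hxt, hxh'⟩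
        have hxh : x ≠ h := by simpa using hxh'
        have hcnt : (List.count x (t.filter (fun r => r ≠ h)) : Int)
            = (List.count x (h :: t) : Int) := by
          rw [pv_count_filter_ne t hxh]; simp [List.count_cons]; exact fun e => hxh e.symm
        rw [hcnt]
        exact (PySem.List.le_foldl_max_int _ _ 0).2 x
          (List.mem_filter.mpr ⟨List.mem_cons_of_mem _ hxt, helig⟩)

theorem pv_M_cons_false {K : Int} {h : List Int} (t : List (List Int))
    (hP : pvElig K h = false) :
    pvM K (h :: t) = pvM K (t.filter (fun r => r ≠ h)) := by
  apply le_antisymm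
  · apply pv_foldl_max_le
    · exact pv_M_nonneg _ _
    · intro x hx
      rcases List.mem_filter.mp hx with ⟨hmem, helig⟩
      have hxh : x ≠ h := by rintro rfl; rw [hP] at helig; exact Bool.false_ne_true helig
      have hxt : x ∈ t := by
        rcases List.mem_cons.mp hmem with h1 | h1
        · exact absurd h1 hxh
        · exact h1
      have hcnt : (List.count x (h :: t) : Int)
          = (List.count x (t.filter (fun r => r ≠ h)) : Int) := by
        rw [pv_count_filter_ne t hxh]; simp [List.count_cons]; exact fun e => hxh e.symm
      rw [hcnt]
      exact (PySem.List.le_foldl_max_int _ _ 0).2 x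
        (List.mem_filter.mpr ⟨List.mem_filter.mpr ⟨hxt, by simpa using hxh⟩, helig⟩)
  · apply pv_foldl_max_le
    · exact pv_M_nonneg _ _
    · intro x hx
      rcases List.mem_filter.mp hx with ⟨hmem, helig⟩
      rcases List.mem_filter.mp hmem with ⟨hxt, hxh'⟩
      have hxh : x ≠ h := by simpa using hxh'
      have hcnt : (List.count x (t.filter (fun r => r ≠ h)) : Int)
          = (List.count x (h :: t) : Int) := by
        rw [pv_count_filter_ne t hxh]; simp [List.count_cons]; exact fun e => hxh e.symm
      rw [hcnt]
      exact (PySem.List.le_foldl_max_int _ _ 0).2 x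
        (List.mem_filter.mpr ⟨List.mem_cons_of_mem _ hxt, helig⟩)

theorem altRec_nil (K : Int) (best : Int) : altRec K [] best = best := by
  rw [altRec.eq_def]

theorem altRec_cons (K : Int) (h : List Int) (t : List (List Int)) (best : Int) :
    altRec K (h :: t) best =
      altRec K (t.filter (fun r => r ≠ h))
        (if (PySem.List.count h 0 : Int) ≤ K ∧
            PySem.Int.mod (K - (PySem.List.count h 0 : Int)) 2 = 0
         then max best (((t.length : Int) + 1) - ((t.filter (fun r => r ≠ h)).length : Int))
         else best) := by
  rw [altRec.eq_def]

/-- The loop of B computes max best (pvM K rows). -/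
theorem pv_altRec_eq (K : Int) : ∀ (xs : List (List Int)) (best : Int), 0 ≤ best →
    altRec K xs best = max best (pvM K xs) := by
  intro xs
  induction xs using (measure List.length).wf.induction with
  | _ xs ih =>
    match xs with
    | [] =>
      intro best hb
      rw [altRec_nil]
      have : pvM K [] = 0 := rfl
      rw [this, max_eq_left hb]
    | h :: t =>
      intro best hb
      have hlt : (t.filter (fun r => r ≠ h)).length < (h :: t).length :=
        Nat.lt_succ_of_le (List.length_filter_le _ _)
      rw [altRec_cons]
      have hgrp : ((t.length : Int) + 1) - ((t.filter (fun r => r ≠ h)).length : Int)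
          = (List.count h (h :: t) : Int) := by
        have := pv_len_filter_ne h t
        rw [List.count_cons_self]; push_cast; omega
      by_cases hP : (PySem.List.count h 0 : Int) ≤ K ∧
          PySem.Int.mod (K - (PySem.List.count h 0 : Int)) 2 = 0
      · have hPb : pvElig K h = true := by unfold pvElig; exact decide_eq_true hP
        rw [if_pos hP, ih (t.filter (fun r => r ≠ h)) hlt _
              (le_trans hb (le_max_left _ _))]
        rw [pv_M_cons_true t hPb, hgrp, max_assoc]
      · have hPb : pvElig K h = false := by unfold pvElig; exact decide_eq_false hP
        rw [if_neg hP, ih (t.filter (fun r => r ≠ h)) hlt _ hb]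
        rw [pv_M_cons_false t hPb]

/-- A running max of a projection from a common init depends only on membership. -/
theorem pv_foldl_max_ext {α : Type} (xs ys : List α) (f : α → Int) (init : Int)
    (h : ∀ x, x ∈ xs ↔ x ∈ ys) :
    xs.foldl (fun a x => max a (f x)) init = ys.foldl (fun a x => max a (f x)) init := by
  refine le_antisymm ?_ ?_
  · exact pv_foldl_max_le xs f init _ (PySem.List.le_foldl_max_int ys f init).1
      (fun x hx => (PySem.List.le_foldl_max_int ys f init).2 x ((h x).mp hx))
  · exact pv_foldl_max_le ys f init _ (PySem.List.le_foldl_max_int xs f init).1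
      (fun x hx => (PySem.List.le_foldl_max_int xs f init).2 x ((h x).mpr hx))

theorem pv_solve_eq_M (N M K : Int) (lamp_map : List (List Int)) :
    solve N M K lamp_map = pvM K lamp_map := by
  have hcounter : lamp_map.foldl (fun d lamps => d.modify lamps 0 (· + 1)) PySem.Dict.empty
      = PySem.Dict.counter lamp_map := rfl
  simp only [solve, pvM, hcounter, PySem.Dict.items_counter, List.foldl_map]
  rw [PySem.List.foldl_ite_eq_foldl_filter
        (p := fun row => (PySem.List.count row 0 : Int) ≤ K ∧
          PySem.Int.mod (K - (PySem.List.count row 0 : Int)) 2 = 0)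
        (f := fun a (row : List Int) => max a (List.count row lamp_map : Int))]
  apply pv_foldl_max_ext
  intro x
  simp only [List.mem_filter, PySem.Set.mem_ofList, pvElig]

theorem solve_eq_alt (N M K : Int) (lamp_map : List (List Int)) :
    solve N M K lamp_map = solve_alt N M K lamp_map := by
  rw [pv_solve_eq_M, solve_alt, pv_altRec_eq K lamp_map 0 le_rfl]
  exact (max_eq_right (pv_M_nonneg K lamp_map)).symm

-- ===== VERDICT (by name: the statement is the Claim_ definition above) =====
theorem solve_spec : Claim_equal_solve := by
  intro N M K lamp_map _
  unfold Spec_solve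
  exact solve_eq_alt N M K lamp_map
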